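-- pv_equiv track=rewrite | github.com/databricks-solutions/lakebase-poc-accelerator | app/backend/services/lakebase_connection_service.py | _convert_ps_placeholders
-- ===== SOURCE A (Python) =====
-- from typing import Dict, List, Any, Optional, Tuple
--
-- def _convert_ps_placeholders(query: str, params: List[Any]) -> Tuple[str, Dict[str, Any]]:
--     """Convert %s placeholders to :p1, :p2 ... and build parameter mapping.
--
--     SQLAlchemy text binds use named parameters. This keeps frontend simple (%s)
--     while allowing safe execution with asyncpg.
--     """
--     converted = []
--     idx = 0
--     i = 0
--     while i < len(query):
--         if i + 1 < len(query) and query[i] == '%' and query[i + 1] == 's':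
--             idx += 1
--             converted.append(f":p{idx}")
--             i += 2
--         else:
--             converted.append(query[i])
--             i += 1
--     mapping = {f"p{i+1}": params[i] for i in range(len(params))}
--     return "".join(converted), mapping
-- ===== SOURCE B (Python) =====
-- from typing import Dict, List, Any, Tuple
--
-- def _convert_ps_placeholders(query: str, params: List[Any]) -> Tuple[str, Dict[str, Any]]:
--     """Convert %s placeholders to :p1, :p2 ... and build parameter mapping."""
--     parts = query.split('%s')
--     pieces = [parts[0]]
--     for k in range(1, len(parts)):
--         pieces.append(f":p{k}")
--         pieces.append(parts[k])
--     mapping = {f"p{i+1}": params[i] for i in range(len(params))}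
--     return "".join(pieces), mapping
-- ===== Notes on version B (the rewrite author's own statement) =====
-- stated objective: idiomatic
-- what changed: Replaces A's index-by-index while loop over the query with the idiomatic split-on-'%s' then rebuild-by-join decomposition (parts = query.split('%s'), interleave ':pk'); the mapping comprehension is unchanged.
import Mathlib
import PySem

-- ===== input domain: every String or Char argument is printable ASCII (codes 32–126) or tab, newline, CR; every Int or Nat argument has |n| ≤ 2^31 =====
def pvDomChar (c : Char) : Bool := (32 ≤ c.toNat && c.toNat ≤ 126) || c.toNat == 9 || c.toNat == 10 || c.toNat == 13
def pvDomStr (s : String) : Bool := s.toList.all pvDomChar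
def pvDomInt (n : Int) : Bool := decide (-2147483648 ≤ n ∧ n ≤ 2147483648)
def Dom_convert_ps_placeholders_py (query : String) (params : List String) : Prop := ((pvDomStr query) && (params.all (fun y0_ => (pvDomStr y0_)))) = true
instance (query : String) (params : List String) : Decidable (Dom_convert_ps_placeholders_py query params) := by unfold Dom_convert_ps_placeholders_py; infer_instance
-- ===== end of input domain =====

-- B replaces A's index-by-index while loop with split-on-'%s' and rebuild-by-join (idiomatic decomposition); same results.

-- ===== PORT A =====
-- helper shared by both ports: both Pythons build the mapping with the IDENTICAL
-- dict comprehension {f"p{i+1}": params[i] for i in range(len(params))}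
def pvMkMapping (params : List String) : List (String × String) :=
  ((PySem.List.pyRange 0 (params.length : Int) 1).foldl
    (fun (d : PySem.Dict String String) i =>
      d.insert (PySem.Str.join "" ["p", PySem.Int.toStr (i + 1)])
        ((PySem.List.pyGet? params i).getD ""))
    (PySem.Dict.mk [])).items

-- A's while loop: at each position, on '%' followed by 's' append ":p{idx}" and jump 2, else copy the char
def pvScanA (cs : List Char) (idx : Int) : List (List Char) :=
  match cs with
  | [] => []
  | c :: rest =>
    if c = '%' ∧ rest.head? = some 's' then
      (':' :: 'p' :: PySem.Int.toChars (idx + 1)) :: pvScanA rest.tail (idx + 1)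
    else [c] :: pvScanA rest idx
termination_by cs.length
decreasing_by
  all_goals simp only [List.length_tail, List.length_cons]; omega

def convert_ps_placeholders_py (query : String) (params : List String) : String × (List (String × String)) :=
  (String.ofList (PySem.Chars.join [] (pvScanA query.toList 0)), pvMkMapping params)

-- ===== PORT B =====
def convert_ps_placeholders_py_alt (query : String) (params : List String) : String × (List (String × String)) :=
  let parts := PySem.Chars.splitOn query.toList ['%', 's']
  let pieces := (PySem.List.pyRange 1 (parts.length : Int) 1).foldl
      (fun acc k => acc ++ [':' :: 'p' :: PySem.Int.toChars k,
                            (PySem.List.pyGet? parts k).getD []])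
      [parts.headD []]
  (String.ofList (PySem.Chars.join [] pieces), pvMkMapping params)

-- ===== PRECONDITION & SPEC =====
def Spec_convert_ps_placeholders_py (query : String) (params : List String) (out : String × (List (String × String))) : Prop := out = convert_ps_placeholders_py_alt query params
instance (query : String) (params : List String) (out : String × (List (String × String))) : Decidable (Spec_convert_ps_placeholders_py query params out) := by unfold Spec_convert_ps_placeholders_py; infer_instance

-- ===== CLAIM (what is proved, stated in full; the proofs are below) =====
def Claim_equal_convert_ps_placeholders_py : Prop := ∀ (query : String) (params : List String), Dom_convert_ps_placeholders_py query params → Spec_convert_ps_placeholders_py query params (convert_ps_placeholders_py query params)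

-- ===== LEMMAS AND PROOFS =====

-- prepend a chunk onto the head of a non-empty list of chunks
def pvPrepH (p : List Char) : List (List Char) → List (List Char)
  | [] => [p]
  | h :: t => (p ++ h) :: t

-- reference splitter: what query.split('%s') produces
def pvSplit (cs : List Char) : List (List Char) :=
  match cs with
  | [] => [[]]
  | c :: rest =>
    if c = '%' ∧ rest.head? = some 's' then [] :: pvSplit rest.tail
    else pvPrepH [c] (pvSplit rest)
termination_by cs.length
decreasing_by
  all_goals simp only [List.length_tail, List.length_cons]; omega

-- the ":p(n+1)"-interleaved tail of the rebuilt string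
def pvTail (ps : List (List Char)) (n : Int) : List Char :=
  match ps with
  | [] => []
  | p :: t => (':' :: 'p' :: PySem.Int.toChars (n + 1)) ++ p ++ pvTail t (n + 1)

def pvRebuild : List (List Char) → Int → List Char
  | [], _ => []
  | h :: t, n => h ++ pvTail t n

theorem pvSplit_nil : pvSplit [] = [[]] := by
  rw [pvSplit.eq_def]

theorem pvSplit_cons (c : Char) (rest : List Char) :
    pvSplit (c :: rest)
      = if c = '%' ∧ rest.head? = some 's' then [] :: pvSplit rest.tail
        else pvPrepH [c] (pvSplit rest) := by
  rw [pvSplit.eq_def]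

theorem pvScanA_nil (idx : Int) : pvScanA [] idx = [] := by
  rw [pvScanA.eq_def]

theorem pvScanA_cons (c : Char) (rest : List Char) (idx : Int) :
    pvScanA (c :: rest) idx
      = if c = '%' ∧ rest.head? = some 's' then
          (':' :: 'p' :: PySem.Int.toChars (idx + 1)) :: pvScanA rest.tail (idx + 1)
        else [c] :: pvScanA rest idx := by
  rw [pvScanA.eq_def]

theorem pvSplit_ne_nil (cs : List Char) : pvSplit cs ≠ [] := by
  cases cs with
  | nil => simp [pvSplit_nil]
  | cons c rest =>
    rw [pvSplit_cons]
    split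
    · simp
    · cases pvSplit rest <;> simp [pvPrepH]

theorem pvPrepH_prepH (p q : List Char) (m : List (List Char)) :
    pvPrepH p (pvPrepH q m) = pvPrepH (p ++ q) m := by
  cases m <;> simp [pvPrepH]

theorem pv_join_nil : ∀ (ps : List (List Char)), PySem.Chars.join [] ps = ps.flatten
  | [] => by simp [PySem.Chars.join, List.intercalate]
  | [p] => by simp [PySem.Chars.join, List.intercalate]
  | p :: q :: t => by
    have ih := pv_join_nil (q :: t)
    simp [PySem.Chars.join, List.intercalate, List.intersperse] at *
    simpa using ih

theorem pv_goSplit (fuel : Nat) : ∀ (l cur : List Char) (acc : List (List Char)) (h : l.length < fuel),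
    PySem.Chars.splitOn.go ['%', 's'] fuel l cur acc
      = acc.reverse ++ pvPrepH cur.reverse (pvSplit l) := by
  induction fuel with
  | zero => intro l cur acc h; omega
  | succ fuel ih =>
    intro l cur acc h
    match l with
    | [] =>
      rw [PySem.Chars.splitOn.go.eq_def]
      simp [pvSplit_nil, pvPrepH]
    | [c] =>
      rw [PySem.Chars.splitOn.go.eq_def]
      have hpre : List.isPrefixOf ['%', 's'] [c] = false := by
        simp [List.isPrefixOf]
      simp only [hpre, Bool.false_eq_true, if_false]
      rw [ih [] (c :: cur) acc (by simp only [List.length_cons, List.length_nil] at h ⊢; omega)]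
      rw [pvSplit_cons]
      simp [pvSplit_nil, pvPrepH]
    | c :: d :: rest =>
      rw [PySem.Chars.splitOn.go.eq_def]
      by_cases hc : c = '%' ∧ d = 's'
      · obtain ⟨hc1, hc2⟩ := hc
        subst hc1; subst hc2
        have hpre : List.isPrefixOf ['%', 's'] ('%' :: 's' :: rest) = true := by
          simp [List.isPrefixOf]
        simp only [hpre, if_true, List.length_cons, List.drop_succ_cons, List.drop_zero,
          List.length_nil, Nat.zero_add]
        rw [ih rest [] (cur.reverse :: acc) (by simp only [List.length_cons] at h; omega)]
        rw [pvSplit_cons]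
        obtain ⟨h0, t0, ht⟩ := List.exists_cons_of_ne_nil (pvSplit_ne_nil rest)
        simp [ht, pvPrepH]
      · have hpre : List.isPrefixOf ['%', 's'] (c :: d :: rest) = false := by
          rcases not_and_or.mp hc with h1 | h2
          · simp only [List.isPrefixOf, Bool.and_eq_false_iff]
            left
            exact beq_eq_false_iff_ne.mpr (Ne.symm h1)
          · simp only [List.isPrefixOf, Bool.and_eq_false_iff]
            right
            left
            exact beq_eq_false_iff_ne.mpr (Ne.symm h2)
        simp only [hpre, Bool.false_eq_true, if_false]
        rw [ih (d :: rest) (c :: cur) acc (by simp only [List.length_cons] at h ⊢; omega)]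
        rw [pvSplit_cons (c := c)]
        have hcond : ¬ (c = '%' ∧ (d :: rest).head? = some 's') := by
          simpa using hc
        rw [if_neg hcond]
        simp only [List.reverse_cons]
        rw [pvPrepH_prepH]

theorem pv_splitOn_eq (cs : List Char) :
    PySem.Chars.splitOn cs ['%', 's'] = pvSplit cs := by
  have h := pv_goSplit (cs.length + 1) cs [] [] (by omega)
  rw [PySem.Chars.splitOn] at *
  rw [h]
  obtain ⟨h0, t0, ht⟩ := List.exists_cons_of_ne_nil (pvSplit_ne_nil cs)
  simp [ht, pvPrepH]

theorem pv_scanA_flatten (cs : List Char) : ∀ (n : Int),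
    (pvScanA cs n).flatten = pvRebuild (pvSplit cs) n := by
  induction cs using pvSplit.induct with
  | case1 => intro n; simp [pvScanA_nil, pvSplit_nil, pvRebuild, pvTail]
  | case2 c rest hcond ih =>
    intro n
    rw [pvScanA_cons, if_pos hcond, pvSplit_cons, if_pos hcond]
    obtain ⟨h0, t0, ht⟩ := List.exists_cons_of_ne_nil (pvSplit_ne_nil rest.tail)
    simp only [List.flatten_cons, ih, ht, pvRebuild, pvTail]
    simp
  | case3 c rest hcond ih =>
    intro n
    rw [pvScanA_cons, if_neg hcond, pvSplit_cons, if_neg hcond]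
    obtain ⟨h0, t0, ht⟩ := List.exists_cons_of_ne_nil (pvSplit_ne_nil rest)
    simp only [List.flatten_cons, ih, ht, pvPrepH, pvRebuild]
    simp

theorem pv_foldB (t : List (List Char)) : ∀ (parts : List (List Char)) (j : Nat)
    (acc : List (List Char)), parts.drop j = t →
    ((PySem.List.pyRange (j : Int) (parts.length : Int) 1).foldl
        (fun acc k => acc ++ [':' :: 'p' :: PySem.Int.toChars k,
                              (PySem.List.pyGet? parts k).getD []]) acc).flatten
      = acc.flatten ++ pvTail t ((j : Int) - 1) := by
  induction t with
  | nil =>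
    intro parts j acc hdrop
    have hj : parts.length ≤ j := by
      by_contra hlt
      have := List.drop_eq_nil_iff.mp hdrop
      omega
    rw [PySem.List.pyRange_one_eq_nil (by exact_mod_cast hj)]
    simp [pvTail]
  | cons p t ihp =>
    intro parts j acc hdrop
    have hj : j < parts.length := by
      by_contra hge
      rw [List.drop_eq_nil_iff.mpr (by omega)] at hdrop
      exact absurd hdrop (by simp)
    have hget : parts[j]? = some p := by
      have h0 : (parts.drop j)[0]? = some p := by rw [hdrop]; rfl
      simpa [List.getElem?_drop] using h0
    have hdrop' : parts.drop (j + 1) = t := by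
      have h1 : (parts.drop j).tail = parts.drop (j + 1) := List.tail_drop
      rw [← h1, hdrop]
      rfl
    rw [PySem.List.pyRange_one_cons (by exact_mod_cast hj)]
    simp only [List.foldl_cons]
    have hcast : (j : Int) + 1 = ((j + 1 : Nat) : Int) := by push_cast; ring
    rw [hcast, ihp parts (j + 1) _ hdrop']
    simp only [List.flatten_append, List.flatten_cons, List.flatten_nil, pvTail]
    rw [PySem.List.pyGet?_natCast, hget]
    have h2 : ((j : Int)) - 1 + 1 = (j : Int) := by ring
    have h3 : ((j + 1 : Nat) : Int) - 1 = (j : Int) := by push_cast; ring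
    rw [h2, h3]
    simp

-- ===== VERDICT (by name: the statement is the Claim_ definition above) =====
theorem convert_ps_placeholders_py_spec : Claim_equal_convert_ps_placeholders_py := by
  intro query params _
  unfold Spec_convert_ps_placeholders_py
  simp only [convert_ps_placeholders_py, convert_ps_placeholders_py_alt]
  refine Prod.ext ?_ rfl
  simp only
  refine congrArg String.ofList ?_
  rw [pv_join_nil, pv_join_nil, pv_scanA_flatten, pv_splitOn_eq]
  obtain ⟨h0, t0, ht⟩ := List.exists_cons_of_ne_nil (pvSplit_ne_nil query.toList)
  rw [ht]
  have hfb := pv_foldB t0 (h0 :: t0) 1 [h0] rfl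
  simp only [Nat.cast_one] at hfb
  simp only [List.headD_cons]
  rw [hfb]
  simp [pvRebuild]
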